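-- pv_equiv track=rewrite | github.com/aviadnavon/distribution-CC-driven-thermal-impacts | machine_learning_demand_forecasting/src/aux_ops.py | extract_unique_dimensions
-- ===== SOURCE A (Python) =====
-- def extract_unique_dimensions(mlp_models, city_regions_to_run=None):
--     """
--     Extracts sorted unique values for each key dimension in the mlp_models dictionary.
--     Optionally filters city and region based on city_regions_to_run, and only includes
--     load_models and building_types for those combinations.
--
--     Parameters:
--     - mlp_models (dict): Dictionary with keys as 5-tuples
--                          (smart_ds_year, city, region, load_model, building_type).
--     - city_regions_to_run (dict, optional): Dictionary of the form
--         {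
--             "City1": ["RegionA", "RegionB"],
--             "City2": ["RegionC"]
--         }
--
--     Returns:
--     - smart_ds_years (list)
--     - cities (list)
--     - regions (list)
--     - load_models (list)
--     - building_types (list)
--     """
--     smart_ds_years_set = set()
--     cities_set = set()
--     regions_set = set()
--     load_models_set = set()
--     building_types_set = set()
--
--     for key in mlp_models.keys():
--         smart_ds_year, city, region, load_model, building_type = key
--
--         if city_regions_to_run:
--             if city not in city_regions_to_run:
--                 continue
--             if region not in city_regions_to_run[city]:
--                 continue
--
--         smart_ds_years_set.add(smart_ds_year)
--         cities_set.add(city)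
--         regions_set.add(region)
--         load_models_set.add(load_model)
--         building_types_set.add(building_type)
--
--     return (
--         sorted(smart_ds_years_set),
--         sorted(cities_set),
--         sorted(regions_set),
--         sorted(load_models_set),
--         sorted(building_types_set)
--     )
-- ===== SOURCE B (Python) =====
-- def extract_unique_dimensions(mlp_models, city_regions_to_run=None):
--     filtered = [key for key in mlp_models
--                 if not city_regions_to_run
--                 or (key[1] in city_regions_to_run
--                     and key[2] in city_regions_to_run[key[1]])]
--     if not filtered:
--         return ([], [], [], [], [])
--     cols = list(zip(*filtered))
--     return tuple(sorted(set(cols[i])) for i in range(5))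
-- ===== Notes on version B (the rewrite author's own statement) =====
-- stated objective: simpler
-- what changed: Replaces A's single row-wise loop that feeds five accumulated sets with a collect-then-aggregate decomposition: filter the kept keys once, transpose with zip(*filtered), and return sorted(set(column)) per column.
import Mathlib
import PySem

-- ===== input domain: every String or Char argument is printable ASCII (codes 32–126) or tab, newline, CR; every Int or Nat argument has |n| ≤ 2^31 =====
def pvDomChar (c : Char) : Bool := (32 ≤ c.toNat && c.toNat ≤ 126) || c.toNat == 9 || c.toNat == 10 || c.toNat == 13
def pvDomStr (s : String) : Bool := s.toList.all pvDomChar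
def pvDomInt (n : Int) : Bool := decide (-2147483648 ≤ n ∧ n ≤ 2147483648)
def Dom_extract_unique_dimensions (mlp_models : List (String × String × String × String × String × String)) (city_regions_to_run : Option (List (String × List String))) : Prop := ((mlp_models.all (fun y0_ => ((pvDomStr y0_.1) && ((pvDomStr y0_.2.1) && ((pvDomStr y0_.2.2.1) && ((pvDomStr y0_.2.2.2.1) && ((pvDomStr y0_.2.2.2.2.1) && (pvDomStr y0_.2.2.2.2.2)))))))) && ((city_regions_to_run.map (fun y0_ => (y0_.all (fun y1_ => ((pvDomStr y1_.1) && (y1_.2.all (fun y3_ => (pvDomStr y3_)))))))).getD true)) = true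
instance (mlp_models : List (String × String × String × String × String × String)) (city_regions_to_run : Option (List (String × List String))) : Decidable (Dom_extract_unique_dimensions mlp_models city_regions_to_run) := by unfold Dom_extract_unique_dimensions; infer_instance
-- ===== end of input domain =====

-- B replaces A's single row-wise pass feeding five sets by filter-then-per-column
-- (collect the kept rows once, then dedup+sort each projection); objective: simpler.
-- Note: A iterates dict keys; iterating the assoc list's key parts is exact here
-- because sets absorb repeated keys.

-- ===== PORT A =====
-- A's per-row body after the `continue` guards: add the five components to the five sets.
def pvAddDims (acc : PySem.Set String × PySem.Set String × PySem.Set String × PySem.Set String × PySem.Set String)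
    (y c r lm bt : String) :
    PySem.Set String × PySem.Set String × PySem.Set String × PySem.Set String × PySem.Set String :=
  (PySem.Set.add acc.1 y, PySem.Set.add acc.2.1 c, PySem.Set.add acc.2.2.1 r,
   PySem.Set.add acc.2.2.2.1 lm, PySem.Set.add acc.2.2.2.2 bt)

-- loop body: `if city_regions_to_run:` (truthiness), then the two `continue` guards
-- (`city_regions_to_run[city]` is ported as get? …; it is only reached when `contains` holds).
def pvStepA (city_regions_to_run : Option (List (String × List String)))
    (acc : PySem.Set String × PySem.Set String × PySem.Set String × PySem.Set String × PySem.Set String)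
    (key : String × String × String × String × String × String) :
    PySem.Set String × PySem.Set String × PySem.Set String × PySem.Set String × PySem.Set String :=
  match city_regions_to_run with
  | none => pvAddDims acc key.1 key.2.1 key.2.2.1 key.2.2.2.1 key.2.2.2.2.1
  | some d =>
    if d.isEmpty then pvAddDims acc key.1 key.2.1 key.2.2.1 key.2.2.2.1 key.2.2.2.2.1
    else if ¬ (PySem.Dict.mk d).contains key.2.1 then acc
    else if ¬ (((PySem.Dict.mk d).get? key.2.1).getD []).contains key.2.2.1 then acc
    else pvAddDims acc key.1 key.2.1 key.2.2.1 key.2.2.2.1 key.2.2.2.2.1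

def extract_unique_dimensions (mlp_models : List (String × String × String × String × String × String)) (city_regions_to_run : Option (List (String × List String))) : List String × List String × List String × List String × List String :=
  let s := mlp_models.foldl (pvStepA city_regions_to_run) ([], [], [], [], [])
  (PySem.List.sorted s.1 (fun x => x) false,
   PySem.List.sorted s.2.1 (fun x => x) false,
   PySem.List.sorted s.2.2.1 (fun x => x) false,
   PySem.List.sorted s.2.2.2.1 (fun x => x) false,
   PySem.List.sorted s.2.2.2.2 (fun x => x) false)

-- ===== PORT B =====
-- the comprehension's condition: not city_regions_to_run or (key[1] in it and key[2] in it[key[1]])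
def pvKeep (city_regions_to_run : Option (List (String × List String)))
    (key : String × String × String × String × String × String) : Bool :=
  match city_regions_to_run with
  | none => true
  | some d =>
    d.isEmpty || ((PySem.Dict.mk d).contains key.2.1 &&
      (((PySem.Dict.mk d).get? key.2.1).getD []).contains key.2.2.1)

-- sorted(set(column)) for one projected column of the filtered rows
def pvCol (filtered : List (String × String × String × String × String × String))
    (f : String × String × String × String × String × String → String) : List String :=
  PySem.List.sorted (PySem.Set.ofList (filtered.map f)) (fun x => x) false

def extract_unique_dimensions_alt (mlp_models : List (String × String × String × String × String × String)) (city_regions_to_run : Option (List (String × List String))) : List String × List String × List String × List String × List String :=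
  let filtered := mlp_models.filter (pvKeep city_regions_to_run)
  if filtered.isEmpty then ([], [], [], [], [])
  else
    (pvCol filtered (fun k => k.1), pvCol filtered (fun k => k.2.1),
     pvCol filtered (fun k => k.2.2.1), pvCol filtered (fun k => k.2.2.2.1),
     pvCol filtered (fun k => k.2.2.2.2.1))

-- ===== PRECONDITION & SPEC =====
def Spec_extract_unique_dimensions (mlp_models : List (String × String × String × String × String × String)) (city_regions_to_run : Option (List (String × List String))) (out : List String × List String × List String × List String × List String) : Prop := out = extract_unique_dimensions_alt mlp_models city_regions_to_run
instance (mlp_models : List (String × String × String × String × String × String)) (city_regions_to_run : Option (List (String × List String))) (out : List String × List String × List String × List String × List String) : Decidable (Spec_extract_unique_dimensions mlp_models city_regions_to_run out) := by unfold Spec_extract_unique_dimensions; infer_instance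

-- ===== CLAIM (what is proved, stated in full; the proofs are below) =====
def Claim_equal_extract_unique_dimensions : Prop := ∀ (mlp_models : List (String × String × String × String × String × String)) (city_regions_to_run : Option (List (String × List String))), Dom_extract_unique_dimensions mlp_models city_regions_to_run → Spec_extract_unique_dimensions mlp_models city_regions_to_run (extract_unique_dimensions mlp_models city_regions_to_run)

-- ===== LEMMAS AND PROOFS =====

-- A's guarded step is: add the five components iff B's filter keeps the row.
theorem pvStepA_eq_keep (cr : Option (List (String × List String)))
    (acc : PySem.Set String × PySem.Set String × PySem.Set String × PySem.Set String × PySem.Set String)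
    (key : String × String × String × String × String × String) :
    pvStepA cr acc key =
      if pvKeep cr key then pvAddDims acc key.1 key.2.1 key.2.2.1 key.2.2.2.1 key.2.2.2.2.1 else acc := by
  cases cr with
  | none => simp [pvStepA, pvKeep]
  | some d =>
    simp only [pvStepA, pvKeep]
    by_cases h1 : d.isEmpty <;> by_cases h2 : (PySem.Dict.mk d).contains key.2.1 <;>
      by_cases h3 : (((PySem.Dict.mk d).get? key.2.1).getD []).contains key.2.2.1 <;>
      simp [h1, h2]

-- A's fold over all rows equals componentwise Set.add-folds over the filtered rows' projections.
theorem pvFold_eq (cr : Option (List (String × List String)))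
    (ms : List (String × String × String × String × String × String))
    (acc : PySem.Set String × PySem.Set String × PySem.Set String × PySem.Set String × PySem.Set String) :
    ms.foldl (pvStepA cr) acc =
      (((ms.filter (pvKeep cr)).map (fun k => k.1)).foldl PySem.Set.add acc.1,
       ((ms.filter (pvKeep cr)).map (fun k => k.2.1)).foldl PySem.Set.add acc.2.1,
       ((ms.filter (pvKeep cr)).map (fun k => k.2.2.1)).foldl PySem.Set.add acc.2.2.1,
       ((ms.filter (pvKeep cr)).map (fun k => k.2.2.2.1)).foldl PySem.Set.add acc.2.2.2.1,
       ((ms.filter (pvKeep cr)).map (fun k => k.2.2.2.2.1)).foldl PySem.Set.add acc.2.2.2.2) := by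
  induction ms generalizing acc with
  | nil => rfl
  | cons k t ih =>
    simp only [List.foldl_cons, List.filter_cons, pvStepA_eq_keep]
    by_cases hk : pvKeep cr k <;> simp [hk, ih, pvAddDims]

-- ===== VERDICT (by name: the statement is the Claim_ definition above) =====
theorem extract_unique_dimensions_spec : Claim_equal_extract_unique_dimensions := by
  intro ms cr _
  unfold Spec_extract_unique_dimensions extract_unique_dimensions extract_unique_dimensions_alt
  simp only [pvFold_eq]
  by_cases h : (ms.filter (pvKeep cr)).isEmpty
  · rw [List.isEmpty_iff] at h
    simp [h, PySem.List.sorted]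
  · simp [h, pvCol, PySem.Set.ofList_eq_foldl]
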